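-- pv_equiv track=rewrite | github.com/Breeze822/Logic_Expert | src/preprocess.py | extract_atomic_propositions_ordered
-- ===== SOURCE A (Python) =====
-- def extract_atomic_propositions_ordered(ltl):
--     """
--     从 LTL 公式中提取原子命题，保持它们在公式中的出现顺序。
--     :param ltl: 输入的 LTL 公式
--     :return: 按照出现顺序的原子命题列表
--     """
--     operators = {"G", "F", "X", "U", "|", "&", "->", "<->", "!"}
--     stack = []
--     atomic_props = []
--     current_token = ""
--
--     i = 0
--     while i < len(ltl):
--         char = ltl[i]
--
--         if char in {"(", ")"}:
--             if current_token.strip() and current_token.strip() not in operators: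
--                 if current_token.strip() not in atomic_props:
--                     atomic_props.append(current_token.strip())
--             current_token = ""
--
--             if char == "(":
--                 stack.append(char)
--             elif char == ")":
--                 if stack:
--                     stack.pop()
--
--         elif char in {" ", "\t"}:
--             if current_token.strip() and current_token.strip() not in operators:
--                 if current_token.strip() not in atomic_props:
--                     atomic_props.append(current_token.strip())
--             current_token = ""
--
--         elif char in "|&":
--             if current_token.strip() and current_token.strip() not in operators:
--                 if current_token.strip() not in atomic_props:
--                     atomic_props.append(current_token.strip())
--             current_token = ""
--
--         elif ltl[i:i+2] in {"->", "<-"}: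
--             if current_token.strip() and current_token.strip() not in operators:
--                 if current_token.strip() not in atomic_props:
--                     atomic_props.append(current_token.strip())
--             current_token = ""
--             i += 1
--
--         elif char.isalnum() or char == "_":
--             current_token += char
--
--         else:
--             if current_token.strip() and current_token.strip() not in operators:
--                 if current_token.strip() not in atomic_props:
--                     atomic_props.append(current_token.strip())
--             current_token = ""
--
--         i += 1
--
--     if current_token.strip() and current_token.strip() not in operators:
--         if current_token.strip() not in atomic_props:
--             atomic_props.append(current_token.strip())
--
--     return atomic_props
-- ===== SOURCE B (Python) =====
-- from itertools import groupby
--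
--
-- def extract_atomic_propositions_ordered(ltl):
--     operators = {"G", "F", "X", "U", "|", "&", "->", "<->", "!"}
--     result = []
--     for is_word, group in groupby(ltl, key=lambda c: c.isalnum() or c == "_"):
--         if is_word:
--             tok = "".join(group)
--             if tok not in operators and tok not in result:
--                 result.append(tok)
--     return result
-- ===== Notes on version B (the rewrite author's own statement) =====
-- stated objective: faster
-- what changed: Replaces the index-driven character state machine (stack, operator lookahead, repeated string-concatenation token buffer) with a two-phase tokenize-then-filter: itertools.groupby splits the formula into maximal alnum/underscore runs, then one loop keeps each non-operator token once in first-occurrence order.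
import Mathlib
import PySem

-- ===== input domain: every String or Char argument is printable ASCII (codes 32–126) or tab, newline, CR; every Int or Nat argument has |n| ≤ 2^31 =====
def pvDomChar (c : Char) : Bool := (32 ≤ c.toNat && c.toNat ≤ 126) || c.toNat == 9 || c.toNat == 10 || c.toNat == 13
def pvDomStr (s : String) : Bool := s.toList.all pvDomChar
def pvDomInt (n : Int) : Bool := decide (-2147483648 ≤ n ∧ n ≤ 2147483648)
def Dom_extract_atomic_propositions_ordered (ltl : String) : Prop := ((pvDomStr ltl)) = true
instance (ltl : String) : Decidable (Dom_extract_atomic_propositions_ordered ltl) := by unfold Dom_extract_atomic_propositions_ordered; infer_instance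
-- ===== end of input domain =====

-- B replaces A's index-driven character state machine by tokenize (maximal alnum/_ runs) then
-- filter/dedup in first-occurrence order: simpler, same exact result.

-- ===== PORT A =====
-- shared operator set (both Pythons carry the same literal set)
def pvOperators : List String := ["G", "F", "X", "U", "|", "&", "->", "<->", "!"]

-- A's repeated flush block: append current_token.strip() if nonempty, not an operator, not seen
def pvFlushA (tok : List Char) (props : List String) : List String :=
  let t := PySem.Chars.strip tok
  if t ≠ [] ∧ String.ofList t ∉ pvOperators ∧ String.ofList t ∉ props then props ++ [String.ofList t]
  else props

-- the while loop over i, transliterated as recursion on the remaining characters;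
-- the `ltl[i:i+2] in {"->","<-"}` two-char lookahead becomes a head? test on the rest,
-- and its `i += 1` consumes that extra character (rest.tail).
def pvLoopA : List Char → List Char → List String → List Char → List String
  | [], _stack, props, tok => pvFlushA tok props
  | c :: rest, stack, props, tok =>
    if c = '(' ∨ c = ')' then
      pvLoopA rest (if c = '(' then stack ++ [c] else stack.dropLast) (pvFlushA tok props) []
    else if c = ' ' ∨ c = '\t' then
      pvLoopA rest stack (pvFlushA tok props) []
    else if c = '|' ∨ c = '&' then
      pvLoopA rest stack (pvFlushA tok props) []
    else if (c = '-' ∧ rest.head? = some '>') ∨ (c = '<' ∧ rest.head? = some '-') then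
      pvLoopA rest.tail stack (pvFlushA tok props) []
    else if PySem.Chars.isalnum c = true ∨ c = '_' then
      pvLoopA rest stack props (tok ++ [c])
    else
      pvLoopA rest stack (pvFlushA tok props) []
termination_by chars => chars.length
decreasing_by
  · simp
  · simp
  · simp
  · simp [List.length_tail]
  · simp
  · simp

def extract_atomic_propositions_ordered (ltl : String) : List String :=
  pvLoopA ltl.toList [] [] []

-- ===== PORT B =====
-- groupby key: c.isalnum() or c == '_'
def pvIsWord (c : Char) : Bool := PySem.Chars.isalnum c || c == '_'

-- the groupby pass: the word-run groups of the character list, joined to strings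
def pvRuns : List Char → List String
  | [] => []
  | c :: cs =>
    if pvIsWord c then
      String.ofList (c :: cs.takeWhile pvIsWord) :: pvRuns (cs.dropWhile pvIsWord)
    else pvRuns cs
termination_by l => l.length
decreasing_by
  · have := cs.length_dropWhile_le pvIsWord; simp; omega
  · simp

-- the filter/dedup for-loop over the tokens
def pvDedup : List String → List String → List String
  | [], res => res
  | tok :: ts, res =>
      pvDedup ts (if tok ∉ pvOperators ∧ tok ∉ res then res ++ [tok] else res)

def extract_atomic_propositions_ordered_alt (ltl : String) : List String :=
  pvDedup (pvRuns ltl.toList) []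

-- ===== PRECONDITION & SPEC =====
def Spec_extract_atomic_propositions_ordered (ltl : String) (out : List String) : Prop := out = extract_atomic_propositions_ordered_alt ltl
instance (ltl : String) (out : List String) : Decidable (Spec_extract_atomic_propositions_ordered ltl out) := by unfold Spec_extract_atomic_propositions_ordered; infer_instance

-- ===== CLAIM (what is proved, stated in full; the proofs are below) =====
def Claim_equal_extract_atomic_propositions_ordered : Prop := ∀ (ltl : String), Dom_extract_atomic_propositions_ordered ltl → Spec_extract_atomic_propositions_ordered ltl (extract_atomic_propositions_ordered ltl)

-- ===== LEMMAS AND PROOFS =====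

-- word characters are not Python whitespace
lemma word_not_space (c : Char) (h : pvIsWord c = true) : PySem.Chars.isspace c = false := by
  simp only [pvIsWord, PySem.Chars.isalnum, PySem.Chars.isalpha, PySem.Chars.isdigit,
    PySem.Chars.isupper, PySem.Chars.islower, Bool.or_eq_true, Bool.and_eq_true,
    decide_eq_true_eq, beq_iff_eq, Char.le_def, UInt32.le_iff_toBitVec_le,
    BitVec.le_def] at h
  have hv : 65 ≤ c.val.toNat ∧ c.val.toNat ≤ 90 ∨ 97 ≤ c.val.toNat ∧ c.val.toNat ≤ 122 ∨
      48 ≤ c.val.toNat ∧ c.val.toNat ≤ 57 ∨ c.val.toNat = 95 := by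
    rcases h with ((h | h) | h) | h
    · exact Or.inl (by exact_mod_cast h)
    · exact Or.inr (Or.inl (by exact_mod_cast h))
    · exact Or.inr (Or.inr (Or.inl (by exact_mod_cast h)))
    · subst h; simp
  simp only [PySem.Chars.isspace, Char.toNat]
  simp only [Bool.or_eq_false_iff, Bool.and_eq_false_iff, decide_eq_false_iff_not]
  omega

-- dropWhile does nothing on a list of non-space characters
lemma drop_nospace (l : List Char) (hs : ∀ c ∈ l, PySem.Chars.isspace c = false) :
    List.dropWhile PySem.Chars.isspace l = l := by
  cases l with
  | nil => simp
  | cons a as => simp [List.dropWhile, hs a (by simp)]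

-- strip is the identity on all-word tokens
lemma strip_word (tok : List Char) (h : ∀ c ∈ tok, pvIsWord c = true) :
    PySem.Chars.strip tok = tok := by
  have hs : ∀ c ∈ tok, PySem.Chars.isspace c = false := fun c hc => word_not_space c (h c hc)
  unfold PySem.Chars.strip PySem.Chars.lstrip PySem.Chars.rstrip
  rw [drop_nospace tok hs, drop_nospace tok.reverse (fun c hc => hs c (List.mem_reverse.mp hc)),
    List.reverse_reverse]

lemma takeWhile_word_append (tok : List Char) (c : Char) (rest : List Char)
    (h : ∀ x ∈ tok, pvIsWord x = true) (hc : pvIsWord c = false) :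
    (tok ++ c :: rest).takeWhile pvIsWord = tok ∧
    (tok ++ c :: rest).dropWhile pvIsWord = c :: rest := by
  induction tok with
  | nil => simp [hc]
  | cons a as ih =>
    have ha := h a (by simp)
    have := ih (fun x hx => h x (by simp [hx]))
    simp [ha, this.1, this.2]

-- runs of tok ++ c :: rest where tok is all-word and c is not
lemma runs_flush (tok : List Char) (c : Char) (rest : List Char)
    (h : ∀ x ∈ tok, pvIsWord x = true) (hc : pvIsWord c = false) :
    pvRuns (tok ++ c :: rest) =
      (if tok = [] then [] else [String.ofList tok]) ++ pvRuns rest := by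
  cases tok with
  | nil => simp [pvRuns, hc]
  | cons a as =>
    have ha := h a (by simp)
    have ht := takeWhile_word_append as c rest (fun x hx => h x (by simp [hx])) hc
    rw [List.cons_append, pvRuns, if_pos ha, ht.1, ht.2]
    simp [pvRuns, hc]

-- runs of an all-word list is the single token (or nothing)
lemma runs_word (tok : List Char) (h : ∀ x ∈ tok, pvIsWord x = true) :
    pvRuns tok = if tok = [] then [] else [String.ofList tok] := by
  cases tok with
  | nil => simp [pvRuns]
  | cons a as =>
    have ha := h a (by simp)
    rw [pvRuns, if_pos ha, List.takeWhile_eq_self_iff.2 (fun x hx => h x (by simp [hx])),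
      List.dropWhile_eq_nil_iff.2 (fun x hx => h x (by simp [hx]))]
    simp [pvRuns]

-- A's flush equals one dedup step on the (all-word) token
lemma flush_eq_step (tok : List Char) (props : List String)
    (h : ∀ x ∈ tok, pvIsWord x = true) :
    pvFlushA tok props =
      if tok = [] then props
      else if String.ofList tok ∉ pvOperators ∧ String.ofList tok ∉ props
           then props ++ [String.ofList tok] else props := by
  unfold pvFlushA
  rw [strip_word tok h]
  cases tok with
  | nil => simp
  | cons a as =>
    by_cases hm : String.ofList (a :: as) ∉ pvOperators ∧ String.ofList (a :: as) ∉ props <;>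
      simp [hm]

-- main invariant: the A loop on (chars, props, tok) computes the dedup of the runs of tok ++ chars
lemma loop_eq (n : Nat) : ∀ (chars : List Char), chars.length ≤ n →
    ∀ (stack : List Char) (props : List String) (tok : List Char),
    (∀ x ∈ tok, pvIsWord x = true) →
    pvLoopA chars stack props tok = pvDedup (pvRuns (tok ++ chars)) props := by
  induction n with
  | zero =>
    intro chars hlen stack props tok htok
    have : chars = [] := List.length_eq_zero_iff.mp (Nat.le_zero.mp hlen)
    subst this
    rw [pvLoopA, List.append_nil, runs_word tok htok, flush_eq_step tok props htok]
    cases tok <;> simp [pvDedup]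
  | succ n ih =>
    intro chars hlen stack props tok htok
    cases chars with
    | nil =>
      rw [pvLoopA, List.append_nil, runs_word tok htok, flush_eq_step tok props htok]
      cases tok <;> simp [pvDedup]
    | cons c rest =>
      have hrest : rest.length ≤ n := by simpa using hlen
      by_cases hw : pvIsWord c = true
      · -- word character: none of the first four branches fires, token grows
        have h1 : ¬ (c = '(' ∨ c = ')') := by
          rintro (rfl | rfl) <;> simp [pvIsWord, PySem.Chars.isalnum, PySem.Chars.isalpha,
            PySem.Chars.isdigit, PySem.Chars.isupper, PySem.Chars.islower] at hw
        have h2 : ¬ (c = ' ' ∨ c = '\t') := by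
          rintro (rfl | rfl) <;> simp [pvIsWord, PySem.Chars.isalnum, PySem.Chars.isalpha,
            PySem.Chars.isdigit, PySem.Chars.isupper, PySem.Chars.islower] at hw
        have h3 : ¬ (c = '|' ∨ c = '&') := by
          rintro (rfl | rfl) <;> simp [pvIsWord, PySem.Chars.isalnum, PySem.Chars.isalpha,
            PySem.Chars.isdigit, PySem.Chars.isupper, PySem.Chars.islower] at hw
        have h4 : ¬ ((c = '-' ∧ rest.head? = some '>') ∨ (c = '<' ∧ rest.head? = some '-')) := by
          rintro (⟨rfl, _⟩ | ⟨rfl, _⟩) <;> simp [pvIsWord, PySem.Chars.isalnum,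
            PySem.Chars.isalpha, PySem.Chars.isdigit, PySem.Chars.isupper,
            PySem.Chars.islower] at hw
        have h5 : PySem.Chars.isalnum c = true ∨ c = '_' := by
          rcases Bool.or_eq_true_iff.mp hw with h | h
          · exact Or.inl h
          · exact Or.inr (by simpa using h)
        rw [pvLoopA, if_neg h1, if_neg h2, if_neg h3, if_neg h4, if_pos h5]
        have htok' : ∀ x ∈ tok ++ [c], pvIsWord x = true := by
          intro x hx
          rcases List.mem_append.mp hx with h | h
          · exact htok x h
          · simp at h; subst h; exact hw
        rw [ih rest hrest stack props (tok ++ [c]) htok']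
        simp
      · -- separator: every branch flushes and resets the token
        have hw' : pvIsWord c = false := by simpa using hw
        have hflush := runs_flush tok c rest htok hw'
        have hded : ∀ l, pvDedup ((if tok = [] then [] else [String.ofList tok]) ++ l) props
            = pvDedup l (pvFlushA tok props) := by
          intro l
          rw [flush_eq_step tok props htok]
          cases tok <;> simp [pvDedup]
        rw [pvLoopA]
        by_cases h1 : c = '(' ∨ c = ')'
        · rw [if_pos h1, ih rest hrest _ _ [] (by simp)]
          simp only [List.nil_append, hflush, hded]
        · rw [if_neg h1]
          by_cases h2 : c = ' ' ∨ c = '\t'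
          · rw [if_pos h2, ih rest hrest _ _ [] (by simp)]
            simp only [List.nil_append, hflush, hded]
          · rw [if_neg h2]
            by_cases h3 : c = '|' ∨ c = '&'
            · rw [if_pos h3, ih rest hrest _ _ [] (by simp)]
              simp only [List.nil_append, hflush, hded]
            · rw [if_neg h3]
              by_cases h4 : (c = '-' ∧ rest.head? = some '>') ∨ (c = '<' ∧ rest.head? = some '-')
              · -- the skipped lookahead character ('>' or '-') is itself a separator
                rw [if_pos h4]
                obtain ⟨d, rest', hd, hrw⟩ : ∃ d rest', pvIsWord d = false ∧ rest = d :: rest' := by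
                  rcases h4 with ⟨_, hh⟩ | ⟨_, hh⟩ <;>
                    · cases rest with
                      | nil => simp at hh
                      | cons d r =>
                        refine ⟨d, r, ?_, rfl⟩
                        simp at hh; subst hh
                        simp [pvIsWord, PySem.Chars.isalnum, PySem.Chars.isalpha,
                          PySem.Chars.isdigit, PySem.Chars.isupper, PySem.Chars.islower]
                subst hrw
                have htail : rest'.length ≤ n := by simp at hrest; omega
                rw [List.tail_cons, ih rest' htail _ _ [] (by simp)]
                have : pvRuns (d :: rest') = pvRuns rest' := by rw [pvRuns, if_neg (by simp [hd])]
                rw [hflush, this, hded]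
                simp
              · rw [if_neg h4]
                have h5 : ¬ (PySem.Chars.isalnum c = true ∨ c = '_') := by
                  intro h
                  rcases h with h | h
                  · simp [pvIsWord, h] at hw'
                  · subst h; simp [pvIsWord] at hw'
                rw [if_neg h5, ih rest hrest _ _ [] (by simp)]
                simp only [List.nil_append, hflush, hded]

-- ===== VERDICT (by name: the statement is the Claim_ definition above) =====
theorem extract_atomic_propositions_ordered_spec : Claim_equal_extract_atomic_propositions_ordered := by
  intro ltl _hdom
  unfold Spec_extract_atomic_propositions_ordered extract_atomic_propositions_ordered
    extract_atomic_propositions_ordered_alt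
  rw [loop_eq ltl.toList.length ltl.toList le_rfl [] [] [] (by simp)]
  simp
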